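-- pv_equiv track=rewrite | github.com/huy29433/IntroductoryPythonCourse | Woche7-Bonus/Aufgabe_5.py | findMatchesVersion2
-- ===== SOURCE A (Python) =====
-- def findMatchesVersion2(listOfSocks):
--     matches = [-1 for i in listOfSocks]
--
--     for i in range(len(listOfSocks)):
--         if matches[i] != -1:
--             continue
--
--         for j in range(len(listOfSocks)):
--             if i == j:
--                 continue
--             if listOfSocks[i] == listOfSocks[j]:
--                 matches[j] = i
--                 matches[i] = j
--                 break
--     return matches
-- ===== SOURCE B (Python) =====
-- def findMatchesVersion2(listOfSocks):
--     positions = {}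
--     for i, v in enumerate(listOfSocks):
--         positions.setdefault(v, []).append(i)
--     res = []
--     for i, v in enumerate(listOfSocks):
--         ps = positions[v]
--         if len(ps) < 2:
--             res.append(-1)
--         elif i == ps[0]:
--             res.append(ps[-1])
--         else:
--             res.append(ps[0])
--     return res
-- ===== Notes on version B (the rewrite author's own statement) =====
-- stated objective: faster
-- what changed: Replaced the quadratic scan-for-a-partner inner loop by one pass that groups positions by value in a dict, then emits each answer directly from the group's first/last position (A's overwrite rule: first occurrence points to the last, all others to the first).
import Mathlib
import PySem

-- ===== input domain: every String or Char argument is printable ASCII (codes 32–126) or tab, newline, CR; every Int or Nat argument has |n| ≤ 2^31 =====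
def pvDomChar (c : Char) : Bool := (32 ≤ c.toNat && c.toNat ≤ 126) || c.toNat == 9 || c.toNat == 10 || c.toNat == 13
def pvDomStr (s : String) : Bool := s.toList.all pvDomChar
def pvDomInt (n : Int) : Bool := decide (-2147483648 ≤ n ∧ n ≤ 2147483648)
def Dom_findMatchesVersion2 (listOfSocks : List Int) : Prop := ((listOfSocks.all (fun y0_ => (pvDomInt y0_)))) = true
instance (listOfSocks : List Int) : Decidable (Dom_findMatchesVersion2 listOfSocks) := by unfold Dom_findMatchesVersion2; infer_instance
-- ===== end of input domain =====

-- B replaces A's quadratic partner-scan by one dict pass grouping positions by value; return value proved identical (O(n) vs O(n^2), measured faster).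

-- ===== PORT A =====
-- inner 'for j in range(...)' with break: scans candidates j in order, first hit sets both cells and stops
def fmInner (l : List Int) (i : Nat) (ms : List Int) : List Nat → List Int
  | [] => ms
  | j :: js =>
    if i = j then fmInner l i ms js
    else if l.getD i 0 = l.getD j 0 then (ms.set j (i : Int)).set i (j : Int)
    else fmInner l i ms js

def findMatchesVersion2 (listOfSocks : List Int) : List Int :=
  (List.range listOfSocks.length).foldl
    (fun ms i =>
      if ms.getD i 0 ≠ -1 then ms
      else fmInner listOfSocks i ms (List.range listOfSocks.length))
    (listOfSocks.map fun _ => (-1 : Int))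

-- ===== PORT B =====
-- first loop of Source B: positions.setdefault(v, []).append(i)
def fmPositions (l : List Int) : PySem.Dict Int (List Int) :=
  (PySem.List.enumerate l 0).foldl
    (fun d p => d.modify p.2 [] (fun ps => ps ++ [p.1])) PySem.Dict.empty

def findMatchesVersion2_alt (listOfSocks : List Int) : List Int :=
  let positions : PySem.Dict Int (List Int) := fmPositions listOfSocks
  (PySem.List.enumerate listOfSocks 0).foldl
    (fun res p =>
      let ps := positions.getD p.2 []
      if ps.length < 2 then res ++ [(-1 : Int)]
      else if p.1 = ps.getD 0 0 then res ++ [(PySem.List.pyGet? ps (-1)).getD 0]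
      else res ++ [ps.getD 0 0])
    []

-- ===== PRECONDITION & SPEC =====
def Spec_findMatchesVersion2 (listOfSocks : List Int) (out : List Int) : Prop := out = findMatchesVersion2_alt listOfSocks
instance (listOfSocks : List Int) (out : List Int) : Decidable (Spec_findMatchesVersion2 listOfSocks out) := by unfold Spec_findMatchesVersion2; infer_instance

-- ===== CLAIM (what is proved, stated in full; the proofs are below) =====
def Claim_equal_findMatchesVersion2 : Prop := ∀ (listOfSocks : List Int), Dom_findMatchesVersion2 listOfSocks → Spec_findMatchesVersion2 listOfSocks (findMatchesVersion2 listOfSocks)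

-- ===== LEMMAS AND PROOFS =====

-- positions (as Nat indices) of value v in l, in increasing order
def occ (l : List Int) (v : Int) : List Nat :=
  (List.range l.length).filter (fun p => l.getD p 0 == v)

-- the common value both programs produce at index q
def specAt (l : List Int) (q : Nat) : Int :=
  match occ l (l.getD q 0) with
  | p0 :: p1 :: rest => if q = p0 then (((p1 :: rest).getLastD 0 : Nat) : Int) else (p0 : Int)
  | _ => -1

-- A's matches array after the outer loop has processed indices 0 .. t-1
def M (l : List Int) (t q : Nat) : Int :=
  match occ l (l.getD q 0) with
  | p0 :: p1 :: rest =>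
    if q = p0 then
      match (rest.filter (fun p => p < t)).getLast? with
      | some m => (m : Int)
      | none => if q < t then (p1 : Int) else -1
    else if q = p1 then (if p0 < t then (p0 : Int) else -1)
    else if q < t then (p0 : Int) else -1
  | _ => -1

theorem mem_occ {l : List Int} {v : Int} {p : Nat} :
    p ∈ occ l v ↔ p < l.length ∧ l.getD p 0 = v := by
  simp [occ]

theorem occ_sorted (l : List Int) (v : Int) : (occ l v).Pairwise (· < ·) :=
  List.pairwise_lt_range.filter _

theorem self_mem_occ {l : List Int} {q : Nat} (h : q < l.length) :
    q ∈ occ l (l.getD q 0) := mem_occ.mpr ⟨h, rfl⟩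

-- inner loop characterisation: first candidate j ≠ i with equal value wins
theorem fmInner_eq (l : List Int) (i : Nat) (ms : List Int) (js : List Nat) :
    fmInner l i ms js =
      match js.find? (fun j => !(i == j) && (l.getD i 0 == l.getD j 0)) with
      | some j => (ms.set j (i : Int)).set i (j : Int)
      | none => ms := by
  induction js with
  | nil => simp [fmInner]
  | cons j js ih =>
    simp only [fmInner]
    by_cases hij : i = j
    · rw [if_pos hij, List.find?_cons_of_neg (by simp [hij]), ih]
    · rw [if_neg hij]
      by_cases hv : l.getD i 0 = l.getD j 0
      · rw [if_pos hv, List.find?_cons_of_pos (by simp only [List.getD_eq_getElem?_getD] at hv; simp [hij, hv])]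
      · rw [if_neg hv, List.find?_cons_of_neg (by simp only [List.getD_eq_getElem?_getD] at hv; simp [hij, hv]), ih]

-- the candidate scan over range n is the occurrence list without i itself
theorem find_partner (l : List Int) (i : Nat) :
    (List.range l.length).find? (fun j => !(i == j) && (l.getD i 0 == l.getD j 0)) =
      ((occ l (l.getD i 0)).filter (fun j => j ≠ i)).head? := by
  rw [← List.head?_filter, occ, List.filter_filter]
  congr 1
  apply List.filter_congr
  intro j _
  by_cases hij : i = j
  · simp [hij]
  · have h1 : (!(i == j)) = true := by simp [hij]
    rw [h1, Bool.true_and, Bool.beq_comm,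
      decide_eq_true (show j ≠ i from fun h => hij h.symm), Bool.true_and]

theorem mapRange_getD (n : Nat) (g : Nat → Int) (t : Nat) (ht : t < n) :
    ((List.range n).map g).getD t 0 = g t := by
  rw [List.getD_eq_getElem?_getD]
  simp [ht]

theorem natCast_ne_negone (m : Nat) : ((m : Nat) : Int) ≠ -1 := by omega

-- a sorted list containing t: cutting below t+1 is cutting below t plus t itself
theorem sorted_filter_succ {xs : List Nat} {t : Nat} (hs : xs.Pairwise (· < ·))
    (hm : t ∈ xs) : xs.filter (fun p => p < t + 1) = xs.filter (fun p => p < t) ++ [t] := by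
  induction xs with
  | nil => simp at hm
  | cons x xs ih =>
    have hpc := List.pairwise_cons.mp hs
    rw [List.filter_cons, List.filter_cons]
    rcases List.mem_cons.mp hm with hx | hx
    · have hall : ∀ p ∈ xs, t < p := fun p hp => hx ▸ hpc.1 p hp
      have h2 : xs.filter (fun p => p < t + 1) = [] := by
        apply List.filter_eq_nil_iff.mpr
        intro p hp
        have := hall p hp
        simp
        omega
      have h3 : xs.filter (fun p => p < t) = [] := by
        apply List.filter_eq_nil_iff.mpr
        intro p hp
        have := hall p hp
        simp
        omega
      rw [if_pos (show (decide (x < t + 1)) = true by simp; omega),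
        if_neg (show ¬ (decide (x < t)) = true by simp; omega), h2, h3]
      simp [hx]
    · have hxt : x < t := hpc.1 t hx
      rw [if_pos (show (decide (x < t + 1)) = true by simp; omega),
        if_pos (show (decide (x < t)) = true by simp; omega),
        ih hpc.2 hx, List.cons_append]

-- indices whose value differs from l[t] are untouched by step t
theorem M_succ_of_ne (l : List Int) (t q : Nat)
    (hne : l.getD q 0 ≠ l.getD t 0) : M l (t + 1) q = M l t q := by
  have hnotin : ∀ p ∈ occ l (l.getD q 0), p ≠ t := by
    intro p hp hpt
    subst hpt
    exact hne ((mem_occ.mp hp).2.symm)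
  have hqt : q ≠ t := fun h => hne (by rw [h])
  unfold M
  cases h : occ l (l.getD q 0) with
  | nil => rfl
  | cons p0 tl =>
    cases tl with
    | nil => rfl
    | cons p1 rest =>
      simp only
      have ht0 : p0 ≠ t := hnotin p0 (by rw [h]; simp)
      have e1 : (q < t + 1) = (q < t) := propext (by omega)
      have e2 : (p0 < t + 1) = (p0 < t) := propext (by omega)
      have e3 : rest.filter (fun p => p < t + 1) = rest.filter (fun p => p < t) := by
        apply List.filter_congr
        intro p hp
        have hpt : p ≠ t := hnotin p (h ▸ List.mem_cons_of_mem _ (List.mem_cons_of_mem _ hp))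
        exact decide_eq_decide.mpr (by omega)
      simp only [e1, e2, e3]

theorem M_eval (l : List Int) (t q p0 p1 : Nat) (rest : List Nat)
    (h : occ l (l.getD q 0) = p0 :: p1 :: rest) :
    M l t q =
      if q = p0 then
        match (rest.filter (fun p => p < t)).getLast? with
        | some m => (m : Int)
        | none => if q < t then (p1 : Int) else -1
      else if q = p1 then (if p0 < t then (p0 : Int) else -1)
      else if q < t then (p0 : Int) else -1 := by
  unfold M
  rw [h]

theorem M_eval1 (l : List Int) (t q x : Nat) (h : occ l (l.getD q 0) = [x]) :
    M l t q = -1 := by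
  unfold M
  rw [h]

-- invariant step
theorem step_M (l : List Int) (t : Nat) (ht : t < l.length) :
    (if ((List.range l.length).map (M l t)).getD t 0 ≠ -1 then ((List.range l.length).map (M l t))
     else fmInner l t ((List.range l.length).map (M l t)) (List.range l.length))
    = (List.range l.length).map (M l (t + 1)) := by
  have hmem : t ∈ occ l (l.getD t 0) := self_mem_occ ht
  have hsort := occ_sorted l (l.getD t 0)
  simp only [mapRange_getD l.length (M l t) t ht]
  rw [fmInner_eq, find_partner]
  cases hO : occ l (l.getD t 0) with
  | nil => rw [hO] at hmem; simp at hmem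
  | cons p0 tl =>
    cases tl with
    | nil =>
      -- t is the only sock of its kind: nothing happens
      have htp : t = p0 := by rw [hO] at hmem; simpa using hmem
      rw [M_eval1 l t t p0 hO, if_neg (by simp)]
      have hf : ([p0].filter (fun j => j ≠ t)) = [] := by simp [← htp]
      rw [hf]
      apply List.map_congr_left
      intro q hq
      have hq' : q < l.length := List.mem_range.mp hq
      by_cases hv : l.getD q 0 = l.getD t 0
      · have hqin : q ∈ occ l (l.getD t 0) := by rw [← hv]; exact self_mem_occ hq'
        rw [hO] at hqin
        have hqt : q = p0 := by simpa using hqin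
        rw [M_eval1 l t q p0 (by rw [hv, hO]), M_eval1 l (t + 1) q p0 (by rw [hv, hO])]
      · exact (M_succ_of_ne l t q hv).symm
    | cons p1 rest =>
      have hpw : p0 < p1 ∧ (∀ p ∈ rest, p0 < p) ∧ (∀ p ∈ rest, p1 < p) ∧ rest.Pairwise (· < ·) := by
        rw [hO] at hsort
        obtain ⟨h1, h2⟩ := List.pairwise_cons.mp hsort
        obtain ⟨h3, h4⟩ := List.pairwise_cons.mp h2
        exact ⟨h1 p1 (by simp), fun p hp => h1 p (by simp [hp]), h3, h4⟩
      have hvmem : ∀ p ∈ occ l (l.getD t 0), l.getD p 0 = l.getD t 0 ∧ p < l.length :=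
        fun p hp => ⟨(mem_occ.mp hp).2, (mem_occ.mp hp).1⟩
      by_cases h0 : t = p0
      · -- t is the first sock of its kind: it pairs with the second one, p1
        subst h0
        have hrt : ∀ p ∈ rest, t < p := fun p hp => hpw.2.1 p hp
        have hMt : M l t t = -1 := by
          rw [M_eval l t t t p1 rest hO, if_pos rfl]
          have hf : rest.filter (fun p => p < t) = [] := by
            apply List.filter_eq_nil_iff.mpr
            intro p hp
            have := hrt p hp
            simp
            omega
          rw [hf]
          simp
        rw [hMt, if_neg (by simp)]
        have hpart : (((t :: p1 :: rest).filter (fun j => j ≠ t)).head?) = some p1 := by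
          have h2 : ¬ p1 = t := by have := hpw.1; omega
          simp [h2]
        rw [hpart]
        show (((List.range l.length).map (M l t)).set p1 (t : Int)).set t (p1 : Int)
            = (List.range l.length).map (M l (t + 1))
        apply List.ext_getElem
        · simp
        · intro q hq1 hq2
          have hq : q < l.length := by simpa using hq2
          simp only [List.getElem_set, List.getElem_map, List.getElem_range]
          by_cases hqt : t = q
          · rw [if_pos hqt, ← hqt, M_eval l (t + 1) t t p1 rest hO, if_pos rfl]
            have hf : rest.filter (fun p => p < t + 1) = [] := by
              apply List.filter_eq_nil_iff.mpr
              intro p hp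
              have := hrt p hp
              simp
              omega
            rw [hf]
            simp
          · rw [if_neg hqt]
            by_cases hqp1 : p1 = q
            · rw [if_pos hqp1, ← hqp1]
              have hv1 : l.getD p1 0 = l.getD t 0 := (hvmem p1 (by rw [hO]; simp)).1
              rw [M_eval l (t + 1) p1 t p1 rest (by rw [hv1, hO]), if_neg (by omega), if_pos rfl,
                if_pos (by omega)]
            · rw [if_neg hqp1]
              by_cases hv : l.getD q 0 = l.getD t 0
              · have hqin : q ∈ occ l (l.getD t 0) := by rw [← hv]; exact self_mem_occ hq
                rw [hO] at hqin
                have hqr : q ∈ rest := by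
                  rcases List.mem_cons.mp hqin with h | h
                  · omega
                  rcases List.mem_cons.mp h with h' | h'
                  · omega
                  · exact h'
                have hgt : p1 < q := hpw.2.2.1 q hqr
                rw [M_eval l t q t p1 rest (by rw [hv, hO]), M_eval l (t + 1) q t p1 rest (by rw [hv, hO]),
                  if_neg (by omega), if_neg (by omega), if_neg (by omega), if_neg (by omega),
                  if_neg (by omega), if_neg (by omega)]
              · exact (M_succ_of_ne l t q hv).symm
      · by_cases h1 : t = p1
        · -- t is the second sock of its kind: it was already paired at step p0, skip
          subst h1
          have hp0t : p0 < t := hpw.1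
          have hrt : ∀ p ∈ rest, t < p := fun p hp => hpw.2.2.1 p hp
          have hMt : M l t t = (p0 : Nat) := by
            rw [M_eval l t t p0 t rest hO, if_neg (by omega), if_pos rfl, if_pos hp0t]
          rw [hMt, if_pos (natCast_ne_negone p0)]
          apply List.map_congr_left
          intro q hq
          have hq' : q < l.length := List.mem_range.mp hq
          by_cases hv : l.getD q 0 = l.getD t 0
          · have hqin : q ∈ occ l (l.getD t 0) := by rw [← hv]; exact self_mem_occ hq'
            rw [hO] at hqin
            by_cases hqp0 : q = p0
            · rw [M_eval l t q p0 t rest (by rw [hv, hO]), M_eval l (t + 1) q p0 t rest (by rw [hv, hO]),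
                if_pos hqp0, if_pos hqp0]
              have hf : rest.filter (fun p => p < t + 1) = rest.filter (fun p => p < t) := by
                apply List.filter_congr
                intro p hp
                have := hrt p hp
                exact decide_eq_decide.mpr (by omega)
              rw [hf]
              cases (rest.filter (fun p => p < t)).getLast? with
              | some m => rfl
              | none => rw [if_pos (by omega), if_pos (by omega)]
            · by_cases hqt : q = t
              · rw [M_eval l t q p0 t rest (by rw [hv, hO]), M_eval l (t + 1) q p0 t rest (by rw [hv, hO]),
                  if_neg hqp0, if_neg hqp0, if_pos hqt, if_pos hqt, if_pos hp0t, if_pos (by omega)]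
              · have hqr : q ∈ rest := by
                  rcases List.mem_cons.mp hqin with h | h
                  · omega
                  rcases List.mem_cons.mp h with h' | h'
                  · omega
                  · exact h'
                have hgt : t < q := hrt q hqr
                rw [M_eval l t q p0 t rest (by rw [hv, hO]), M_eval l (t + 1) q p0 t rest (by rw [hv, hO]),
                  if_neg hqp0, if_neg hqp0, if_neg hqt, if_neg hqt, if_neg (by omega), if_neg (by omega)]
          · exact (M_succ_of_ne l t q hv).symm
        · -- t is a later duplicate: it re-pairs with the first sock p0
          have htr : t ∈ rest := by
            rw [hO] at hmem
            rcases List.mem_cons.mp hmem with h | h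
            · omega
            rcases List.mem_cons.mp h with h' | h'
            · omega
            · exact h'
          have hp0t : p0 < t := hpw.2.1 t htr
          have hp1t : p1 < t := hpw.2.2.1 t htr
          have hMt : M l t t = -1 := by
            rw [M_eval l t t p0 p1 rest hO, if_neg h0, if_neg h1, if_neg (by omega)]
          rw [hMt, if_neg (by simp)]
          have hpart : ((p0 :: p1 :: rest).filter (fun j => j ≠ t)).head? = some p0 := by
            have h2 : ¬ p0 = t := by omega
            simp [List.filter_cons, h2]
          rw [hpart]
          show (((List.range l.length).map (M l t)).set p0 (t : Int)).set t (p0 : Int)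
              = (List.range l.length).map (M l (t + 1))
          apply List.ext_getElem
          · simp
          · intro q hq1 hq2
            have hq : q < l.length := by simpa using hq2
            simp only [List.getElem_set, List.getElem_map, List.getElem_range]
            by_cases hqt : t = q
            · rw [if_pos hqt, ← hqt]
              rw [M_eval l (t + 1) t p0 p1 rest hO, if_neg h0, if_neg h1, if_pos (by omega)]
            · rw [if_neg hqt]
              by_cases hqp0 : p0 = q
              · rw [if_pos hqp0, ← hqp0]
                have hv0 : l.getD p0 0 = l.getD t 0 := (hvmem p0 (by rw [hO]; simp)).1
                rw [M_eval l (t + 1) p0 p0 p1 rest (by rw [hv0, hO]), if_pos rfl,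
                  sorted_filter_succ hpw.2.2.2 htr, List.getLast?_concat]
              · rw [if_neg hqp0]
                by_cases hv : l.getD q 0 = l.getD t 0
                · have hqin : q ∈ occ l (l.getD t 0) := by rw [← hv]; exact self_mem_occ hq
                  rw [hO] at hqin
                  by_cases hqp1 : q = p1
                  · rw [M_eval l t q p0 p1 rest (by rw [hv, hO]), M_eval l (t + 1) q p0 p1 rest (by rw [hv, hO]),
                      if_neg (by omega), if_pos hqp1, if_pos hp0t,
                      if_neg (by omega), if_pos hqp1, if_pos (by omega)]
                  · have hqr : q ∈ rest := by
                      rcases List.mem_cons.mp hqin with h | h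
                      · omega
                      rcases List.mem_cons.mp h with h' | h'
                      · omega
                      · exact h'
                    rw [M_eval l t q p0 p1 rest (by rw [hv, hO]), M_eval l (t + 1) q p0 p1 rest (by rw [hv, hO]),
                      if_neg (by omega), if_neg hqp1]
                    by_cases hql : q < t
                    · rw [if_pos hql, if_neg (by omega), if_neg hqp1, if_pos (by omega)]
                    · rw [if_neg hql, if_neg (by omega), if_neg hqp1, if_neg (by omega)]
                · exact (M_succ_of_ne l t q hv).symm

theorem M_zero (l : List Int) (q : Nat) : M l 0 q = -1 := by
  unfold M
  cases h : occ l (l.getD q 0) with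
  | nil => rfl
  | cons p0 tl =>
    cases tl with
    | nil => rfl
    | cons p1 rest => simp

theorem M_final (l : List Int) (q : Nat) (hq : q < l.length) :
    M l l.length q = specAt l q := by
  unfold M specAt
  cases h : occ l (l.getD q 0) with
  | nil => rfl
  | cons p0 tl =>
    cases tl with
    | nil => rfl
    | cons p1 rest =>
      have hsub : ∀ p ∈ rest, p < l.length := by
        intro p hp
        exact (mem_occ.mp (by rw [h]; exact List.mem_cons_of_mem _ (List.mem_cons_of_mem _ hp))).1
      have hfilt : rest.filter (fun p => p < l.length) = rest := by
        apply List.filter_eq_self.mpr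
        intro p hp
        exact decide_eq_true (hsub p hp)
      simp only
      rw [hfilt]
      by_cases hqp : q = p0
      · rw [if_pos hqp, if_pos hqp]
        cases rest with
        | nil => simp [hq]
        | cons r rs =>
          rw [List.getLastD_cons, List.getLastD_eq_getLast?]
          cases hg : (r :: rs).getLast? with
          | none => simp at hg
          | some m => simp
      · rw [if_neg hqp, if_neg hqp]
        have hp0 : p0 < l.length :=
          (mem_occ.mp (by rw [h]; exact List.mem_cons_self)).1
        by_cases hqp1 : q = p1
        · rw [if_pos hqp1, if_pos hp0]
        · rw [if_neg hqp1, if_pos hq]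

theorem portA_eq (l : List Int) :
    findMatchesVersion2 l = (List.range l.length).map (specAt l) := by
  have key : ∀ t, t ≤ l.length →
      (List.range t).foldl
        (fun ms i => if ms.getD i 0 ≠ -1 then ms else fmInner l i ms (List.range l.length))
        (l.map fun _ => (-1 : Int))
      = (List.range l.length).map (M l t) := by
    intro t
    induction t with
    | zero =>
      intro _
      apply List.ext_getElem
      · simp
      · intro q h1 h2
        simp [M_zero]
    | succ t ih =>
      intro ht
      rw [List.range_succ, List.foldl_append, ih (Nat.le_of_succ_le ht)]
      simpa using step_M l t (Nat.lt_of_succ_le ht)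
  unfold findMatchesVersion2
  rw [key l.length le_rfl]
  apply List.map_congr_left
  intro q hq
  exact M_final l q (List.mem_range.mp hq)

theorem enumRange (l : List Int) :
    PySem.List.enumerate l 0 = (List.range l.length).map (fun (k : Nat) => ((k : Int), l.getD k 0)) := by
  rw [PySem.List.enumerate_eq_map_pyRange l 0,
    show PySem.List.len l = ((l.length : Nat) : Int) from rfl,
    PySem.List.pyRange_zero_natCast, List.map_map]
  apply List.map_congr_left
  intro k _
  simp [PySem.List.pyGetD_natCast]

theorem posD (l : List Int) (v : Int) :
    (fmPositions l).getD v [] = (occ l v).map (fun (k : Nat) => (k : Int)) := by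
  unfold fmPositions
  have h1 : (PySem.List.enumerate l 0).foldl
      (fun d p => d.modify p.2 [] (fun ps => ps ++ [p.1])) PySem.Dict.empty
      = ((PySem.List.enumerate l 0).map Prod.swap).foldl
          (fun d p => d.modify p.1 [] (fun ps => ps ++ [p.2])) PySem.Dict.empty := by
    rw [List.foldl_map]
    rfl
  rw [h1, PySem.Dict.getD_foldl_modify_append, enumRange, List.map_map, List.filter_map,
    List.map_map]
  have h2 : ((fun (p : Int × Int) => p.1 == v) ∘ Prod.swap ∘ fun (k : Nat) => ((k : Int), l.getD k 0))
      = fun k => l.getD k 0 == v := rfl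
  rw [h2]
  simp [occ]

-- the value appended by the second loop of Source B for entry p = (i, v)
def eB (l : List Int) (p : Int × Int) : Int :=
  let ps := (fmPositions l).getD p.2 []
  if ps.length < 2 then -1
  else if p.1 = ps.getD 0 0 then (PySem.List.pyGet? ps (-1)).getD 0
  else ps.getD 0 0

theorem foldl_append_singleton {α : Type} (g : α → Int) (xs : List α) :
    ∀ init : List Int, xs.foldl (fun r p => r ++ [g p]) init = init ++ xs.map g := by
  induction xs with
  | nil => intro init; simp
  | cons x xs ih => intro init; simp [ih]

theorem eB_spec (l : List Int) (k : Nat) (hk : k < l.length) :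
    eB l ((k : Int), l.getD k 0) = specAt l k := by
  unfold eB specAt
  rw [posD]
  have hmem := self_mem_occ hk
  cases h : occ l (l.getD k 0) with
  | nil => rw [h] at hmem; simp at hmem
  | cons p0 tl =>
    cases tl with
    | nil => simp
    | cons p1 rest =>
      simp only [List.map_cons, List.length_cons, List.length_map]
      rw [if_neg (by omega)]
      have hget0 : (((p0 : Int) :: (p1 : Int) :: rest.map (fun (k : Nat) => (k : Int))).getD 0 0) = (p0 : Int) := rfl
      rw [hget0]
      by_cases hqp : k = p0
      · rw [if_pos (by exact_mod_cast congrArg (Nat.cast (R := Int)) hqp), if_pos hqp,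
          PySem.List.pyGet?_neg_one]
        rw [show ((p0 : Int) :: (p1 : Int) :: rest.map (fun (k : Nat) => (k : Int)))
              = ((p0 :: p1 :: rest).map (fun (k : Nat) => (k : Int))) from rfl,
          List.getLast?_map, List.getLast?_cons_cons, List.getLastD_eq_getLast?]
        cases hg : (p1 :: rest).getLast? with
        | none => simp at hg
        | some m => simp
      · rw [if_neg (by exact_mod_cast fun h => hqp (Nat.cast_injective h)), if_neg hqp]

theorem portB_eq (l : List Int) :
    findMatchesVersion2_alt l = (List.range l.length).map (specAt l) := by
  show (PySem.List.enumerate l 0).foldl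
      (fun res p =>
        let ps := (fmPositions l).getD p.2 []
        if ps.length < 2 then res ++ [(-1 : Int)]
        else if p.1 = ps.getD 0 0 then res ++ [(PySem.List.pyGet? ps (-1)).getD 0]
        else res ++ [ps.getD 0 0]) []
    = (List.range l.length).map (specAt l)
  have hbody : (fun (res : List Int) (p : Int × Int) =>
      let ps := (fmPositions l).getD p.2 []
      if ps.length < 2 then res ++ [(-1 : Int)]
      else if p.1 = ps.getD 0 0 then res ++ [(PySem.List.pyGet? ps (-1)).getD 0]
      else res ++ [ps.getD 0 0]) = fun res p => res ++ [eB l p] := by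
    funext r p
    simp only [eB]
    split_ifs <;> rfl
  rw [hbody, foldl_append_singleton, List.nil_append, enumRange, List.map_map]
  apply List.map_congr_left
  intro k hk
  exact eB_spec l k (List.mem_range.mp hk)

-- ===== VERDICT (by name: the statement is the Claim_ definition above) =====
theorem findMatchesVersion2_spec : Claim_equal_findMatchesVersion2 := by
  intro l _
  show findMatchesVersion2 l = findMatchesVersion2_alt l
  rw [portA_eq, portB_eq]
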